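-- pv_equiv track=rewrite | github.com/kelmegan/maizemind-juncture | scripts/scoring_compare.py | claim_connected_to_thesis_current
-- ===== SOURCE A (Python) =====
-- from typing import Any
--
-- def edge_role(edge: dict[str, Any] | None) -> str:
--     if not edge:
--         return ""
--     role = str(edge.get("role", edge.get("type", ""))).upper().strip()
--     if role == "CONTRADICTS":
--         return "OPPOSES"
--     if role == "ADDRESSES":
--         return "RESOLVES"
--     return role
--
-- def claim_connected_to_thesis_current(nodes: list[dict[str, Any]], edges: list[dict[str, Any]], claim_id: str, thesis_ids: list[str]) -> bool:
--     if claim_id in thesis_ids or not thesis_ids: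
--         return True
--     visited = {claim_id}
--     queue = [claim_id]
--     idx = 0
--     while idx < len(queue):
--         cur = queue[idx]
--         if cur in thesis_ids:
--             return True
--         for edge in edges:
--             et = edge_role(edge)
--             if et not in ["SUPPORTS", "RESOLVES", "OPPOSES"]:
--                 continue
--             nxt = ""
--             if edge.get("source", "") == cur:
--                 nxt = str(edge.get("target", ""))
--             elif edge.get("target", "") == cur:
--                 nxt = str(edge.get("source", ""))
--             if nxt and nxt not in visited:
--                 visited.add(nxt)
--                 queue.append(nxt)
--         idx += 1
--     return False
-- ===== SOURCE B (Python) =====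
-- def claim_connected_to_thesis_current(nodes, edges, claim_id, thesis_ids):
--     if not thesis_ids or claim_id in thesis_ids:
--         return True
--     theses = set(thesis_ids)
--     # index the valid-role edges once (both directions), instead of rescanning all edges per node
--     pairs = []
--     for edge in edges:
--         role = str(edge.get("role", edge.get("type", ""))).upper().strip()
--         if role in ("SUPPORTS", "RESOLVES", "OPPOSES", "CONTRADICTS", "ADDRESSES"):
--             s = str(edge.get("source", ""))
--             t = str(edge.get("target", ""))
--             pairs.append((s, t))
--             pairs.append((t, s))
--     adj = {}
--     for s, t in pairs:
--         adj.setdefault(s, []).append(t)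
--     visited = {claim_id}
--     queue = [claim_id]
--     idx = 0
--     while idx < len(queue):
--         cur = queue[idx]
--         idx += 1
--         if cur in theses:
--             return True
--         for nxt in adj.get(cur, ()):
--             if nxt and nxt not in visited:
--                 visited.add(nxt)
--                 queue.append(nxt)
--     return False
-- ===== Notes on version B (the rewrite author's own statement) =====
-- stated objective: alternative
-- what changed: Instead of rescanning the whole edge list (and recomputing every edge's role) once per visited node, B normalizes roles once, builds an undirected adjacency dict of the valid-role edges in one pass, and runs the BFS over that index with the thesis ids held in a set.
import Mathlib
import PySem

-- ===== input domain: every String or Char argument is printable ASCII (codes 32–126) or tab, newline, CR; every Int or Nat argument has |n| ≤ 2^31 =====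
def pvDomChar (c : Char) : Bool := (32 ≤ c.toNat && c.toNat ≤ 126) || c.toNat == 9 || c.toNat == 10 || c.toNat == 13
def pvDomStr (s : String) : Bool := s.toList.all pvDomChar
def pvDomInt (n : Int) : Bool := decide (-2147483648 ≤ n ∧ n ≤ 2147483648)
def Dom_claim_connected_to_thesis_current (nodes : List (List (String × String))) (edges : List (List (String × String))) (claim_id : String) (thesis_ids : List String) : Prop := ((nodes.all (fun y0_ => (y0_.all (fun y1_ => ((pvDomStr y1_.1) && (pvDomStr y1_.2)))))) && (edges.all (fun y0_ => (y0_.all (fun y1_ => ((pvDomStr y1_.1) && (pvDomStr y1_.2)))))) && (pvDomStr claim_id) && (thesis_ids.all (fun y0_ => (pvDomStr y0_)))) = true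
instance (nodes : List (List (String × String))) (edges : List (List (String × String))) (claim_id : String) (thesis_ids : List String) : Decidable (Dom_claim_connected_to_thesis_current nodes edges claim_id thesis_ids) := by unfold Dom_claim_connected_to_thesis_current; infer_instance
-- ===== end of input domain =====

-- B precomputes an adjacency index of the valid-role edges once and runs BFS over it
-- (with the thesis ids in a set), instead of rescanning all edges for every visited node.


-- dict.get(k, d) on an edge dict (association list, first match wins)
def pvLook (edge : List (String × String)) (k d : String) : String :=
  (PySem.Dict.mk edge).getD k d

-- ===== PORT A =====
def edge_role (edge : List (String × String)) : String :=
  if edge = [] then ""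
  else
    let role := PySem.Str.strip (PySem.Str.upper (pvLook edge "role" (pvLook edge "type" "")))
    if role = "CONTRADICTS" then "OPPOSES"
    else if role = "ADDRESSES" then "RESOLVES"
    else role

-- the inner 'for edge in edges' body of A's while loop (visited, queue-tail accumulator)
def bfsScanA (edges : List (List (String × String))) (cur : String)
    (st : PySem.Set String × List String) : PySem.Set String × List String :=
  edges.foldl (fun st edge =>
    let et := edge_role edge
    if ["SUPPORTS", "RESOLVES", "OPPOSES"].contains et then
      let nxt :=
        if pvLook edge "source" "" = cur then pvLook edge "target" ""
        else if pvLook edge "target" "" = cur then pvLook edge "source" ""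
        else ""
      if nxt ≠ "" && !(st.1.contains nxt) then (PySem.Set.add st.1 nxt, st.2 ++ [nxt])
      else st
    else st) st

-- A's while loop; fuel only makes it total (2*|edges|+2 always exceeds the iteration count,
-- since each iteration pops one enqueued node and at most 1 + 2*|edges| nodes are ever enqueued)
def bfsLoopA (edges : List (List (String × String))) (thesis_ids : List String) :
    Nat → PySem.Set String → List String → Bool
  | 0, _, _ => false
  | _ + 1, _, [] => false
  | fuel + 1, visited, cur :: rest =>
    if thesis_ids.contains cur then true
    else
      let st := bfsScanA edges cur (visited, rest)
      bfsLoopA edges thesis_ids fuel st.1 st.2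

def claim_connected_to_thesis_current (nodes : List (List (String × String))) (edges : List (List (String × String))) (claim_id : String) (thesis_ids : List String) : Bool :=
  if thesis_ids.contains claim_id || thesis_ids.isEmpty then true
  else bfsLoopA edges thesis_ids (2 * edges.length + 2) (PySem.Set.ofList [claim_id]) [claim_id]

-- ===== PORT B =====
-- B's inline role normalization and 5-way validity test
def validRole (edge : List (String × String)) : Bool :=
  ["SUPPORTS", "RESOLVES", "OPPOSES", "CONTRADICTS", "ADDRESSES"].contains
    (PySem.Str.strip (PySem.Str.upper (pvLook edge "role" (pvLook edge "type" ""))))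

-- first pass of B: the directed pair list of the valid edges (both directions)
def adjPairs (edges : List (List (String × String))) : List (String × String) :=
  edges.foldl (fun pairs edge =>
    if validRole edge then
      pairs ++ [(pvLook edge "source" "", pvLook edge "target" ""),
                (pvLook edge "target" "", pvLook edge "source" "")]
    else pairs) []

-- second pass of B: adj.setdefault(s, []).append(t)
def adjOf (edges : List (List (String × String))) : PySem.Dict String (List String) :=
  (adjPairs edges).foldl (fun d p => PySem.Dict.modify d p.1 [] (· ++ [p.2])) PySem.Dict.empty

-- B's inner 'for nxt in adj.get(cur, ())' body
def pushStep (st : PySem.Set String × List String) (nxt : String) :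
    PySem.Set String × List String :=
  if nxt ≠ "" && !(st.1.contains nxt) then (PySem.Set.add st.1 nxt, st.2 ++ [nxt]) else st

def bfsLoopB (adj : PySem.Dict String (List String)) (theses : PySem.Set String) :
    Nat → PySem.Set String → List String → Bool
  | 0, _, _ => false
  | _ + 1, _, [] => false
  | fuel + 1, visited, cur :: rest =>
    if theses.contains cur then true
    else
      let st := (adj.getD cur []).foldl pushStep (visited, rest)
      bfsLoopB adj theses fuel st.1 st.2

def claim_connected_to_thesis_current_alt (nodes : List (List (String × String))) (edges : List (List (String × String))) (claim_id : String) (thesis_ids : List String) : Bool :=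
  if thesis_ids.isEmpty || thesis_ids.contains claim_id then true
  else bfsLoopB (adjOf edges) (PySem.Set.ofList thesis_ids) (2 * edges.length + 2)
        (PySem.Set.ofList [claim_id]) [claim_id]

-- ===== PRECONDITION & SPEC =====
def Spec_claim_connected_to_thesis_current (nodes : List (List (String × String))) (edges : List (List (String × String))) (claim_id : String) (thesis_ids : List String) (out : Bool) : Prop := out = claim_connected_to_thesis_current_alt nodes edges claim_id thesis_ids
instance (nodes : List (List (String × String))) (edges : List (List (String × String))) (claim_id : String) (thesis_ids : List String) (out : Bool) : Decidable (Spec_claim_connected_to_thesis_current nodes edges claim_id thesis_ids out) := by unfold Spec_claim_connected_to_thesis_current; infer_instance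

-- ===== CLAIM (what is proved, stated in full; the proofs are below) =====
def Claim_equal_claim_connected_to_thesis_current : Prop := ∀ (nodes : List (List (String × String))) (edges : List (List (String × String))) (claim_id : String) (thesis_ids : List String), Dom_claim_connected_to_thesis_current nodes edges claim_id thesis_ids → Spec_claim_connected_to_thesis_current nodes edges claim_id thesis_ids (claim_connected_to_thesis_current nodes edges claim_id thesis_ids)

-- ===== LEMMAS AND PROOFS =====

-- A's 3-way membership test on the remapped role equals B's 5-way test on the raw normalized role

lemma contains_iff (s : PySem.Set String) (x : String) : s.contains x = true ↔ x ∈ s :=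
  List.contains_iff_mem

lemma roleTest_eq (edge : List (String × String)) :
    (["SUPPORTS", "RESOLVES", "OPPOSES"].contains (edge_role edge)) = validRole edge := by
  by_cases he : edge = []
  · subst he; decide
  · unfold edge_role validRole
    simp only [he, if_false]
    generalize (PySem.Str.strip (PySem.Str.upper (pvLook edge "role" (pvLook edge "type" "")))) = r
    by_cases h1 : r = "CONTRADICTS"
    · subst h1; decide
    · by_cases h2 : r = "ADDRESSES"
      · subst h2; decide
      · simp only [h1, h2, if_false, List.contains_eq_mem, List.mem_cons, List.not_mem_nil]
        rw [decide_eq_decide]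
        constructor
        · tauto
        · rintro (h | h | h | h | h) <;> tauto

-- A's per-edge neighbour candidates for cur
def candA (cur : String) (edge : List (String × String)) : List String :=
  if validRole edge then
    (if pvLook edge "source" "" = cur then [pvLook edge "target" ""]
     else if pvLook edge "target" "" = cur then [pvLook edge "source" ""]
     else [])
  else []

-- B's per-edge neighbour candidates for cur (what the adjacency index stores under cur)
def candB (cur : String) (edge : List (String × String)) : List String :=
  if validRole edge then
    (if pvLook edge "source" "" = cur then [pvLook edge "target" ""] else []) ++
    (if pvLook edge "target" "" = cur then [pvLook edge "source" ""] else [])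
  else []


lemma scan_body_eq (cur : String) (st : PySem.Set String × List String)
    (edge : List (String × String)) :
    (let et := edge_role edge
     if ["SUPPORTS", "RESOLVES", "OPPOSES"].contains et then
       let nxt :=
         if pvLook edge "source" "" = cur then pvLook edge "target" ""
         else if pvLook edge "target" "" = cur then pvLook edge "source" ""
         else ""
       if nxt ≠ "" && !(st.1.contains nxt) then (PySem.Set.add st.1 nxt, st.2 ++ [nxt])
       else st
     else st) = (candA cur edge).foldl pushStep st := by
  simp only [roleTest_eq, candA]
  generalize pvLook edge "source" "" = s
  generalize pvLook edge "target" "" = t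
  by_cases hv : validRole edge
  · simp only [hv, if_true]
    by_cases h1 : s = cur
    · simp [h1, pushStep]
    · by_cases h2 : t = cur
      · simp [h1, h2, pushStep]
      · simp [h1, h2]
  · simp [hv]

lemma bfsScanA_eq_foldl (edges : List (List (String × String))) (cur : String)
    (st : PySem.Set String × List String) :
    bfsScanA edges cur st = (edges.flatMap (candA cur)).foldl pushStep st := by
  induction edges generalizing st with
  | nil => rfl
  | cons e es ih =>
    simp only [bfsScanA, List.foldl_cons, List.flatMap_cons, List.foldl_append] at *
    rw [← scan_body_eq cur st e]
    exact ih _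

lemma adjPairs_eq (edges : List (List (String × String))) :
    adjPairs edges = edges.flatMap (fun edge =>
      if validRole edge then
        [(pvLook edge "source" "", pvLook edge "target" ""),
         (pvLook edge "target" "", pvLook edge "source" "")]
      else []) := by
  unfold adjPairs
  have : ∀ (pairs : List (String × String)) (edge : List (String × String)),
      (if validRole edge then
        pairs ++ [(pvLook edge "source" "", pvLook edge "target" ""),
                  (pvLook edge "target" "", pvLook edge "source" "")]
      else pairs)
      = pairs ++ (if validRole edge then
        [(pvLook edge "source" "", pvLook edge "target" ""),
         (pvLook edge "target" "", pvLook edge "source" "")] else []) := by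
    intro pairs edge; by_cases hv : validRole edge <;> simp [hv]
  simp only [this]
  exact PySem.List.foldl_append_eq_flatMap _ edges []


lemma adj_getD (edges : List (List (String × String))) (cur : String) :
    (adjOf edges).getD cur [] = edges.flatMap (candB cur) := by
  unfold adjOf
  rw [PySem.Dict.getD_foldl_modify_append, adjPairs_eq]
  simp only [PySem.Dict.getD_empty, List.nil_append, List.filter_flatMap, List.map_flatMap]
  refine List.flatMap_congr ?_
  intro edge _
  unfold candB
  generalize pvLook edge "source" "" = s
  generalize pvLook edge "target" "" = t
  by_cases hv : validRole edge
  · simp only [hv, if_true]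
    by_cases h1 : s = cur
    · by_cases h2 : t = cur
      · simp [List.filter, h1, h2]
      · simp [List.filter, h1, h2, beq_eq_false_iff_ne.2 h2]
    · by_cases h2 : t = cur
      · simp [List.filter, h1, h2, beq_eq_false_iff_ne.2 h1]
      · simp [List.filter, h1, h2, beq_eq_false_iff_ne.2 h1, beq_eq_false_iff_ne.2 h2]
  · simp [hv]


lemma pushStep_contains_mono (st : PySem.Set String × List String) (n x : String)
    (h : st.1.contains x = true) : (pushStep st n).1.contains x = true := by
  unfold pushStep
  split
  · exact (contains_iff _ _).2
      ((PySem.Set.mem_add st.1 n x).2 (Or.inl ((contains_iff _ _).1 h)))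
  · exact h

lemma foldl_pushStep_contains_mono (l : List String) (st : PySem.Set String × List String)
    (x : String) (h : st.1.contains x = true) :
    (l.foldl pushStep st).1.contains x = true := by
  induction l generalizing st with
  | nil => exact h
  | cons n t ih => exact ih _ (pushStep_contains_mono st n x h)


lemma pushStep_self (st : PySem.Set String × List String) (cur : String)
    (h : st.1.contains cur = true) : pushStep st cur = st := by
  simp [pushStep, contains_iff _ _ |>.1 h]


lemma foldl_cand_eq (cur : String) (edges : List (List (String × String)))
    (st : PySem.Set String × List String) (h : st.1.contains cur = true) :
    (edges.flatMap (candA cur)).foldl pushStep st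
      = (edges.flatMap (candB cur)).foldl pushStep st := by
  induction edges generalizing st with
  | nil => simp only [List.flatMap_nil, List.foldl_nil]
  | cons e es ih =>
    simp only [List.flatMap_cons, List.foldl_append]
    have hstep : (candA cur e).foldl pushStep st = (candB cur e).foldl pushStep st := by
      unfold candA candB
      generalize pvLook e "source" "" = s
      generalize pvLook e "target" "" = t
      by_cases hv : validRole e
      · simp only [hv, if_true]
        by_cases h1 : s = cur
        · by_cases h2 : t = cur
          · simp only [h1, h2, if_true, List.singleton_append,
              List.foldl_cons, List.foldl_nil]
            exact (pushStep_self _ cur (pushStep_contains_mono st cur cur h)).symm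
          · simp [h1, h2]
        · by_cases h2 : t = cur <;> simp [h1, h2]
      · simp [hv]
    rw [hstep]
    exact ih _ (foldl_pushStep_contains_mono _ _ _ h)


lemma pushStep_queue_inv (st : PySem.Set String × List String) (n : String)
    (h : ∀ x ∈ st.2, st.1.contains x = true) :
    ∀ x ∈ (pushStep st n).2, (pushStep st n).1.contains x = true := by
  unfold pushStep
  split
  · intro x hx
    rcases List.mem_append.1 hx with hq | hn
    · exact (contains_iff _ _).2 ((PySem.Set.mem_add st.1 n x).2
        (Or.inl ((contains_iff _ _).1 (h x hq))))
    · exact (contains_iff _ _).2 ((PySem.Set.mem_add st.1 n x).2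
        (Or.inr (List.mem_singleton.1 hn)))
  · exact h

lemma foldl_pushStep_queue_inv (l : List String) (st : PySem.Set String × List String)
    (h : ∀ x ∈ st.2, st.1.contains x = true) :
    ∀ x ∈ (l.foldl pushStep st).2, (l.foldl pushStep st).1.contains x = true := by
  induction l generalizing st with
  | nil => exact h
  | cons n t ih => exact ih _ (pushStep_queue_inv st n h)


lemma ofList_contains (xs : List String) (x : String) :
    (PySem.Set.ofList xs).contains x = xs.contains x := by
  rw [Bool.eq_iff_iff, contains_iff, List.contains_iff_mem]
  exact PySem.Set.mem_ofList xs x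

lemma loop_eq (edges : List (List (String × String))) (thesis_ids : List String) :
    ∀ (fuel : Nat) (visited : PySem.Set String) (q : List String),
      (∀ x ∈ q, visited.contains x = true) →
      bfsLoopA edges thesis_ids fuel visited q
        = bfsLoopB (adjOf edges) (PySem.Set.ofList thesis_ids) fuel visited q := by
  intro fuel
  induction fuel with
  | zero => intro visited q _; rfl
  | succ f ih =>
    intro visited q hq
    match q with
    | [] => rfl
    | cur :: rest =>
      simp only [bfsLoopA, bfsLoopB, ofList_contains]
      by_cases ht : cur ∈ thesis_ids
      · simp [ht]
      · have hb : thesis_ids.contains cur = false := by simpa using ht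
        simp only [hb, Bool.false_eq_true, if_false]
        rw [bfsScanA_eq_foldl, adj_getD,
            ← foldl_cand_eq cur edges (visited, rest) (hq cur List.mem_cons_self)]
        exact ih _ _ (foldl_pushStep_queue_inv _ (visited, rest)
          (fun x hx => hq x (List.mem_cons_of_mem _ hx)))

-- ===== VERDICT (by name: the statement is the Claim_ definition above) =====
theorem claim_connected_to_thesis_current_spec : Claim_equal_claim_connected_to_thesis_current := by
  intro nodes edges claim_id thesis_ids _
  unfold Spec_claim_connected_to_thesis_current
  unfold claim_connected_to_thesis_current claim_connected_to_thesis_current_alt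
  by_cases h1 : thesis_ids = []
  · simp [h1]
  · by_cases h2 : claim_id ∈ thesis_ids
    · simp [h2]
    · have e1 : thesis_ids.contains claim_id = false := by
        simpa using h2
      have e2 : thesis_ids.isEmpty = false := by
        simpa [List.isEmpty_iff] using h1
      simp only [e1, e2, Bool.or_false, Bool.false_eq_true, if_false]
      refine loop_eq edges thesis_ids _ _ [claim_id] ?_
      intro x hx
      rw [List.mem_singleton.1 hx]
      exact (contains_iff _ _).2 ((PySem.Set.mem_ofList _ _).2 (by simp))
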